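-- pv_equiv track=rewrite | github.com/dartharnold/EDTS | find.py | anagram_find_matches
-- ===== SOURCE A (Python) =====
-- def anagram_find_matches(keys, query):
--   results = []
--   for sys_name in keys:
--     cur_query = query
--     for key in sys_name.split(' '):
--       passed = True
--       for ch in key:
--         if ch >= 'a' and ch <= 'z' and ch not in cur_query:
--           passed = False
--           break
--         cur_query = cur_query.replace(str(ch), '', 1)
--       if passed and len(cur_query) == 0:
--         results.append(sys_name)
--   return results
-- ===== SOURCE B (Python) =====
-- def anagram_find_matches(keys, query):
--   # One flat scan per name (sentinel space ends the last word): no split(),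
--   # no nested word/char loops with break; an up-counting dict of consumed
--   # chars + a remaining counter replace the shrinking query string.
--   need = {}
--   for ch in query:
--     need[ch] = need.get(ch, 0) + 1
--   results = []
--   for sys_name in keys:
--     taken = {}
--     left = len(query)
--     skipping = False
--     for ch in sys_name + ' ':
--       if ch == ' ':
--         if not skipping and left == 0:
--           results.append(sys_name)
--         skipping = False
--       elif not skipping:
--         t = taken.get(ch, 0)
--         if t < need.get(ch, 0):
--           taken[ch] = t + 1
--           left -= 1
--         elif 'a' <= ch <= 'z':
--           skipping = True
--   return results
-- ===== Notes on version B (the rewrite author's own statement) =====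
-- stated objective: faster
-- what changed: B replaces A's three nested loops (split(' ') into words, per-word char loop with break, and per-char substring scan plus string rebuild via replace) by a single flat left-to-right scan over each name with a sentinel space marking word ends, a skip flag instead of break, and an up-counting consumed-char dict with a remaining counter instead of the shrinking query string, making each character step O(1).
import Mathlib
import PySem

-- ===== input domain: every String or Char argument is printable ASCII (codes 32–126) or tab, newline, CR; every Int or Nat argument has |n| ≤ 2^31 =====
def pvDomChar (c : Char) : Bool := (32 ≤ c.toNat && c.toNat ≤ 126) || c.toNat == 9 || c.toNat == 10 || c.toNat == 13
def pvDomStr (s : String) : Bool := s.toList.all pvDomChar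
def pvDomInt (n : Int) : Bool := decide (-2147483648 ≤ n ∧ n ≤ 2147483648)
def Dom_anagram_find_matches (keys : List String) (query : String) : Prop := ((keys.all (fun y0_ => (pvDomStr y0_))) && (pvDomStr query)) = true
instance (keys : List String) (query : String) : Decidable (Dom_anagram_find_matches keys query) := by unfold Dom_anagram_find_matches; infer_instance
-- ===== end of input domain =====

-- B replaces A's three nested loops (split(' '), per-word char loop with break, substring
-- scan + rebuild) by one flat scan per name with a sentinel space, a skip flag and an
-- up-counting consumed-char dict with a remaining counter.

-- ===== PORT A =====
-- cur_query.replace(str(ch), '', 1): exact for a single-char pattern — removes the first occurrence of ch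
def pvRemoveFirst (ch : Char) : List Char → List Char
  | [] => []
  | c :: cs => if c == ch then cs else c :: pvRemoveFirst ch cs

-- the `for ch in key` loop: returns (passed, cur_query); `ch not in cur_query` is exact as char non-membership
def pvKeyLoopA : List Char → List Char → Bool × List Char
  | [], cur => (true, cur)
  | ch :: rest, cur =>
    if ('a' ≤ ch ∧ ch ≤ 'z') ∧ ch ∉ cur then (false, cur)
    else pvKeyLoopA rest (pvRemoveFirst ch cur)

def anagram_find_matches (keys : List String) (query : String) : List String :=
  keys.foldl (fun results sys_name =>
    ((PySem.Chars.splitOn sys_name.toList [' ']).foldl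
      (fun (st : List String × List Char) key =>
        let passedCur := pvKeyLoopA key st.2
        (if passedCur.1 = true ∧ passedCur.2.length = 0 then st.1 ++ [sys_name] else st.1,
         passedCur.2))
      (results, query.toList)).1) []

-- ===== PORT B =====
-- the body of Source B's single `for ch in sys_name + ' '` loop; state = (results, taken, left, skipping)
def pvStepB (need : PySem.Dict Char Int) (sys_name : String)
    (st : List String × PySem.Dict Char Int × Int × Bool) (ch : Char) :
    List String × PySem.Dict Char Int × Int × Bool :=
  if ch = ' ' then
    (if st.2.2.2 = false ∧ st.2.2.1 = 0 then st.1 ++ [sys_name] else st.1, st.2.1, st.2.2.1, false)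
  else if st.2.2.2 = true then st
  else
    let t := st.2.1.getD ch 0
    if t < need.getD ch 0 then (st.1, st.2.1.insert ch (t + 1), st.2.2.1 - 1, false)
    else if ('a' ≤ ch ∧ ch ≤ 'z') then (st.1, st.2.1, st.2.2.1, true)
    else st

def anagram_find_matches_alt (keys : List String) (query : String) : List String :=
  let need : PySem.Dict Char Int :=
    query.toList.foldl (fun d ch => d.insert ch (d.getD ch 0 + 1)) PySem.Dict.empty
  keys.foldl (fun results sys_name =>
    ((sys_name.toList ++ [' ']).foldl (pvStepB need sys_name)
      (results, PySem.Dict.empty, PySem.Str.len query, false)).1) []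

-- ===== PRECONDITION & SPEC =====
def Spec_anagram_find_matches (keys : List String) (query : String) (out : List String) : Prop := out = anagram_find_matches_alt keys query
instance (keys : List String) (query : String) (out : List String) : Decidable (Spec_anagram_find_matches keys query out) := by unfold Spec_anagram_find_matches; infer_instance

-- ===== CLAIM (what is proved, stated in full; the proofs are below) =====
def Claim_equal_anagram_find_matches : Prop := ∀ (keys : List String) (query : String), Dom_anagram_find_matches keys query → Spec_anagram_find_matches keys query (anagram_find_matches keys query)

-- ===== LEMMAS AND PROOFS =====

-- reference recursion for s.split(' ')
def pvWords : List Char → List (List Char)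
  | [] => [[]]
  | c :: r =>
    if c = ' ' then [] :: pvWords r
    else match pvWords r with
      | [] => [[c]]
      | w :: ws => (c :: w) :: ws

theorem pvWords_ne_nil (s : List Char) : pvWords s ≠ [] := by
  cases s with
  | nil => simp [pvWords]
  | cons c r =>
    simp only [pvWords]
    split
    · simp
    · split <;> simp

theorem pvGo_eq (fuel : Nat) : ∀ (l cur : List Char) (acc : List (List Char)), l.length ≤ fuel →
    PySem.Chars.splitOn.go [' '] fuel l cur acc
      = acc.reverse ++ (pvWords l).modifyHead (fun w => cur.reverse ++ w) := by
  induction fuel with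
  | zero =>
    intro l cur acc h
    have : l = [] := by cases l <;> simp_all
    subst this
    simp [PySem.Chars.splitOn.go, pvWords]
  | succ n ih =>
    intro l cur acc h
    cases l with
    | nil => simp [PySem.Chars.splitOn.go, pvWords]
    | cons c rest =>
      obtain ⟨w, ws, hpw⟩ : ∃ w ws, pvWords rest = w :: ws := by
        cases hp : pvWords rest with
        | nil => exact absurd hp (pvWords_ne_nil rest)
        | cons w ws => exact ⟨w, ws, rfl⟩
      by_cases hc : c = ' '
      · subst hc
        rw [PySem.Chars.splitOn.go]
        simp only [List.isPrefixOf, Bool.and_true, beq_self_eq_true, if_pos]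
        rw [ih _ _ _ (by simpa using Nat.le_of_succ_le_succ h)]
        simp [pvWords, hpw]
      · rw [PySem.Chars.splitOn.go]
        have hpre : [' '].isPrefixOf (c :: rest) = false := by
          simp [List.isPrefixOf]
          exact fun h' => hc h'.symm
        rw [hpre]
        simp only [Bool.false_eq_true, if_false]
        rw [ih _ _ _ (by simpa using Nat.le_of_succ_le_succ h)]
        simp [pvWords, hc, hpw]
  
theorem pvSplitOn_eq (s : List Char) : PySem.Chars.splitOn s [' '] = pvWords s := by
  unfold PySem.Chars.splitOn
  rw [pvGo_eq _ _ _ _ (by omega)]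
  obtain ⟨w, ws, hpw⟩ : ∃ w ws, pvWords s = w :: ws := by
    cases hp : pvWords s with
    | nil => exact absurd hp (pvWords_ne_nil s)
    | cons w ws => exact ⟨w, ws, rfl⟩
  simp [hpw]

theorem pvWords_no_space (s : List Char) (h : ' ' ∉ s) : pvWords s = [s] := by
  induction s with
  | nil => rfl
  | cons c r ih =>
    have hc : c ≠ ' ' := fun hc => h (hc ▸ List.mem_cons_self)
    have hr : ' ' ∉ r := fun hr => h (List.mem_cons_of_mem _ hr)
    simp [pvWords, hc, ih hr]

theorem pvWords_append (u v : List Char) (h : ' ' ∉ u) :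
    pvWords (u ++ ' ' :: v) = u :: pvWords v := by
  induction u with
  | nil => simp [pvWords]
  | cons c u ih =>
    have hc : c ≠ ' ' := fun hc => h (hc ▸ List.mem_cons_self)
    have hu : ' ' ∉ u := fun hu => h (List.mem_cons_of_mem _ hu)
    simp [pvWords, hc, ih hu]

theorem pvSplitFirstSpace (s : List Char) (h : ' ' ∈ s) :
    ∃ u v, ' ' ∉ u ∧ s = u ++ ' ' :: v ∧ v.length < s.length := by
  induction s with
  | nil => cases h
  | cons c r ih =>
    by_cases hc : c = ' '
    · exact ⟨[], r, by simp, by simp [hc], by simp⟩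
    · have hr : ' ' ∈ r := by
        rcases List.mem_cons.mp h with h' | h'
        · exact absurd h'.symm hc
        · exact h'
      obtain ⟨u, v, hu, heq, hlt⟩ := ih hr
      exact ⟨c :: u, v, by simp [hu, Ne.symm hc], by simp [heq], by simp; omega⟩

theorem pvRemoveFirst_eq_erase (ch : Char) (cur : List Char) :
    pvRemoveFirst ch cur = cur.erase ch := by
  induction cur with
  | nil => rfl
  | cons c cs ih => simp [pvRemoveFirst, List.erase_cons, ih]

-- skipping = True: every non-space character is a no-op
theorem pvSkipNoSpace (need : PySem.Dict Char Int) (nm : String) (u : List Char) (h : ' ' ∉ u)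
    (res : List String) (tk : PySem.Dict Char Int) (l : Int) :
    u.foldl (pvStepB need nm) (res, tk, l, true) = (res, tk, l, true) := by
  induction u with
  | nil => rfl
  | cons c u ih =>
    have hc : c ≠ ' ' := fun hc => h (hc ▸ List.mem_cons_self)
    have hu : ' ' ∉ u := fun hu => h (List.mem_cons_of_mem _ hu)
    rw [List.foldl_cons]
    have : pvStepB need nm (res, tk, l, true) c = (res, tk, l, true) := by
      simp [pvStepB, hc]
    rw [this, ih hu]

-- the simulation: one flat scan with sentinel = A's fold over the words,
-- given that taken + remaining-multiset = Counter(query) and left = |remaining|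
theorem pvScan (q : List Char) (need : PySem.Dict Char Int)
    (hneed : ∀ c, need.getD c 0 = (q.count c : Int)) (nm : String) :
    ∀ n s, s.length ≤ n → ∀ (res : List String) (cur : List Char)
      (taken : PySem.Dict Char Int) (left : Int),
      (∀ c, taken.getD c 0 + (cur.count c : Int) = (q.count c : Int)) →
      left = (cur.length : Int) →
      ((s ++ [' ']).foldl (pvStepB need nm) (res, taken, left, false)).1
        = ((pvWords s).foldl (fun (st : List String × List Char) key =>
            let r := pvKeyLoopA key st.2
            (if r.1 = true ∧ r.2.length = 0 then st.1 ++ [nm] else st.1, r.2)) (res, cur)).1 := by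
  intro n
  induction n with
  | zero =>
    intro s hs res cur taken left hinv hleft
    have : s = [] := by cases s <;> simp_all
    subst this
    simp [pvWords, pvStepB, pvKeyLoopA, hleft]
  | succ n ih =>
    intro s hs res cur taken left hinv hleft
    cases s with
    | nil => simp [pvWords, pvStepB, pvKeyLoopA, hleft]
    | cons c rest =>
      have hrest : rest.length ≤ n := by simpa using Nat.le_of_succ_le_succ hs
      obtain ⟨w, ws, hpw⟩ : ∃ w ws, pvWords rest = w :: ws := by
        cases hp : pvWords rest with
        | nil => exact absurd hp (pvWords_ne_nil rest)
        | cons w ws => exact ⟨w, ws, rfl⟩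
      by_cases hc : c = ' '
      · -- word boundary
        subst hc
        simp only [List.cons_append, List.foldl_cons]
        have hstep : pvStepB need nm (res, taken, left, false) ' '
            = ((if left = 0 then res ++ [nm] else res), taken, left, false) := by
          simp [pvStepB]
        rw [hstep, ih rest hrest _ cur taken left hinv hleft]
        have hz : (left = 0) = (cur.length = 0) := by
          rw [hleft]; simp
        simp [pvWords, pvKeyLoopA, hz]
      · by_cases hmem : c ∈ cur
        · -- consumable character: both sides consume one c
          have hcount : 0 < cur.count c := List.count_pos_iff.mpr hmem
          have ht : taken.getD c 0 < need.getD c 0 := by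
            have := hinv c; rw [hneed c]; omega
          have hstep : pvStepB need nm (res, taken, left, false) c
              = (res, taken.insert c (taken.getD c 0 + 1), left - 1, false) := by
            simp [pvStepB, hc, ht]
          have hA : pvKeyLoopA (c :: w) cur = pvKeyLoopA w (cur.erase c) := by
            rw [pvKeyLoopA, if_neg (fun h' => h'.2 hmem), pvRemoveFirst_eq_erase]
          have hinv' : ∀ d, (taken.insert c (taken.getD c 0 + 1)).getD d 0
              + ((cur.erase c).count d : Int) = (q.count d : Int) := by
            intro d
            rcases eq_or_ne d c with rfl | hdc
            · rw [PySem.Dict.getD_insert_self, List.count_erase_self]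
              have := hinv d
              omega
            · rw [PySem.Dict.getD_insert_of_ne _ _ _ hdc, List.count_erase_of_ne hdc]
              exact hinv d
          have hleft' : left - 1 = ((cur.erase c).length : Int) := by
            rw [List.length_erase_of_mem hmem, hleft]
            have : 0 < cur.length := List.length_pos_of_mem hmem
            omega
          simp only [List.cons_append, List.foldl_cons]
          rw [hstep, ih rest hrest _ (cur.erase c) _ _ hinv' hleft']
          simp only [pvWords, if_neg hc, hpw, List.foldl_cons, hA]
        · have hzero : cur.count c = 0 := List.count_eq_zero.mpr hmem
          have hteq : taken.getD c 0 = (q.count c : Int) := by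
            have := hinv c; omega
          have hnlt : ¬ taken.getD c 0 < need.getD c 0 := by
            rw [hneed c, hteq]; omega
          by_cases hlz : 'a' ≤ c ∧ c ≤ 'z'
          · -- lowercase and absent: the word fails; B skips to the next space
            have hstep : pvStepB need nm (res, taken, left, false) c
                = (res, taken, left, true) := by
              simp [pvStepB, hc, hnlt, hlz]
            have hA : pvKeyLoopA (c :: w) cur = (false, cur) := by
              rw [pvKeyLoopA, if_pos ⟨hlz, hmem⟩]
            simp only [List.cons_append, List.foldl_cons]
            rw [hstep]
            by_cases hsp : ' ' ∈ rest
            · obtain ⟨u, v, hu, heq, hlt⟩ := pvSplitFirstSpace rest hsp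
              subst heq
              have hskip : ((u ++ ' ' :: v) ++ [' ']).foldl (pvStepB need nm) (res, taken, left, true)
                  = (v ++ [' ']).foldl (pvStepB need nm) (res, taken, left, false) := by
                have h1 : (u ++ ' ' :: v) ++ [' '] = u ++ ' ' :: (v ++ [' ']) := by simp
                rw [h1, List.foldl_append, pvSkipNoSpace need nm u hu, List.foldl_cons]
                have : pvStepB need nm (res, taken, left, true) ' ' = (res, taken, left, false) := by
                  simp [pvStepB]
                rw [this]
              rw [hskip, ih v (by omega) _ cur taken left hinv hleft]
              have hA' : pvKeyLoopA (c :: u) cur = (false, cur) := by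
                rw [pvKeyLoopA, if_pos ⟨hlz, hmem⟩]
              simp only [pvWords, if_neg hc, pvWords_append u v hu, List.foldl_cons, hA']
              simp
            · have h1 : (rest ++ [' ']).foldl (pvStepB need nm) (res, taken, left, true)
                  = (res, taken, left, false) := by
                rw [List.foldl_append, pvSkipNoSpace need nm rest hsp]
                simp [pvStepB]
              rw [h1]
              have hA' : pvKeyLoopA (c :: rest) cur = (false, cur) := by
                rw [pvKeyLoopA, if_pos ⟨hlz, hmem⟩]
              simp [pvWords, hc, pvWords_no_space rest hsp, hA']
          · -- not lowercase and absent: a no-op on both sides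
            have hstep : pvStepB need nm (res, taken, left, false) c
                = (res, taken, left, false) := by
              simp [pvStepB, hc, hnlt, hlz]
            have hA : pvKeyLoopA (c :: w) cur = pvKeyLoopA w cur := by
              rw [pvKeyLoopA, if_neg (fun h' => hlz h'.1), pvRemoveFirst_eq_erase,
                List.erase_of_not_mem hmem]
            simp only [List.cons_append, List.foldl_cons]
            rw [hstep, ih rest hrest _ cur taken left hinv hleft]
            simp only [pvWords, if_neg hc, hpw, List.foldl_cons, hA]

-- ===== VERDICT (by name: the statement is the Claim_ definition above) =====
theorem anagram_find_matches_spec : Claim_equal_anagram_find_matches := by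
  intro keys query hdom
  clear hdom
  unfold Spec_anagram_find_matches anagram_find_matches anagram_find_matches_alt
  have hneed : ∀ c, (query.toList.foldl (fun d ch => d.insert ch (d.getD ch 0 + 1))
      PySem.Dict.empty).getD c 0 = (query.toList.count c : Int) := by
    intro c
    rw [PySem.Dict.getD_foldl_insert_add_one]
    simp
  suffices h : ∀ res : List String,
      keys.foldl (fun results sys_name =>
        ((PySem.Chars.splitOn sys_name.toList [' ']).foldl
          (fun (st : List String × List Char) key =>
            let passedCur := pvKeyLoopA key st.2
            (if passedCur.1 = true ∧ passedCur.2.length = 0 then st.1 ++ [sys_name] else st.1,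
             passedCur.2))
          (results, query.toList)).1) res
      = keys.foldl (fun results sys_name =>
        ((sys_name.toList ++ [' ']).foldl
          (pvStepB (query.toList.foldl (fun d ch => d.insert ch (d.getD ch 0 + 1))
            PySem.Dict.empty) sys_name)
          (results, PySem.Dict.empty, PySem.Str.len query, false)).1) res by
    exact h []
  intro res
  induction keys generalizing res with
  | nil => rfl
  | cons nm rest ih =>
    simp only [List.foldl_cons]
    rw [pvSplitOn_eq, ← pvScan query.toList _ hneed nm nm.toList.length nm.toList le_rfl res
      query.toList PySem.Dict.empty (PySem.Str.len query)
      (by intro c; simp) (by rw [PySem.Str.len_eq]), ih]
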